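-- pv_equiv track=rewrite | github.com/tylergneill/skrutable | src/skrutable/tests/unit_tests/test_scheme_detection.py | _highlight_diff
-- ===== SOURCE A (Python) =====
-- def _highlight_diff(source, target):
--     """
--     Compare source and target strings, return target with differing
--     segments wrapped in [brackets].
--     """
--     if source == target:
--         return target + '  (identical)'
--     result = []
--     i = 0
--     while i < len(target):
--         if i < len(source) and source[i] == target[i]:
--             result.append(target[i])
--             i += 1
--         else:
--             # Find the extent of the differing region
--             j = i
--             while j < len(target) and (j >= len(source) or source[j] != target[j]):
--                 j += 1
--             result.append('[')
--             result.append(target[i:j])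
--             result.append(']')
--             i = j
--     return ''.join(result)
-- ===== SOURCE B (Python) =====
-- def _highlight_diff(source, target):
--     if source == target:
--         return target + '  (identical)'
--     mask = [a == b for a, b in zip(source, target)] + [False] * (len(target) - len(source))
--     pieces = []
--     cur = []
--     cur_ok = True
--     for c, ok in zip(target, mask):
--         if cur and ok != cur_ok:
--             pieces.append(''.join(cur) if cur_ok else '[' + ''.join(cur) + ']')
--             cur = []
--         cur.append(c)
--         cur_ok = ok
--     if cur:
--         pieces.append(''.join(cur) if cur_ok else '[' + ''.join(cur) + ']')
--     return ''.join(pieces)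
-- ===== Notes on version B (the rewrite author's own statement) =====
-- stated objective: idiomatic
-- what changed: Replaced the index-based while loop with an inner mismatch-scanning loop by building a per-position match mask with zip and making one run-grouping pass over (char, matched) pairs, rendering each run at a flag change.
import Mathlib
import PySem

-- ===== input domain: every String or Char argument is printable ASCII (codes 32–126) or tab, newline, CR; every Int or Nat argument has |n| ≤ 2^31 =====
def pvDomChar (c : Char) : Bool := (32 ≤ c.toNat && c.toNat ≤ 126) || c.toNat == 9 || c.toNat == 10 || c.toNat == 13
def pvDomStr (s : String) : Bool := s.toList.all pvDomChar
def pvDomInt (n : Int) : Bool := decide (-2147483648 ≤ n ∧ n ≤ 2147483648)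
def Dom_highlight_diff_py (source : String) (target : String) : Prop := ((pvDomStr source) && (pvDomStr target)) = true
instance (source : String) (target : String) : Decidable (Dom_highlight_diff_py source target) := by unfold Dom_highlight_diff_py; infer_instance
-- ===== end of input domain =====

-- B replaces A's index-based while loop with inner mismatch scan by a match mask plus a
-- single run-grouping pass (idiomatic, same O(n) cost).

-- ===== PORT A =====
-- inner while loop of A: scans the differing region, returning (diff chars, rest of target, rest of source)
def aScan : List Char → List Char → List Char × List Char × List Char
  | s, [] => ([], [], s)
  | [], t :: ts => (t :: (aScan [] ts).1, (aScan [] ts).2)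
  | c :: cs, t :: ts =>
      if c = t then ([], t :: ts, c :: cs)
      else (t :: (aScan cs ts).1, (aScan cs ts).2)

theorem aScan_len (s t : List Char) : (aScan s t).2.1.length ≤ t.length := by
  induction t generalizing s with
  | nil => cases s <;> simp [aScan]
  | cons a ts ih =>
    cases s with
    | nil => simpa [aScan] using Nat.le_succ_of_le (ih [])
    | cons c cs =>
      by_cases h : c = a
      · simp [aScan, h]
      · simpa [aScan, h] using Nat.le_succ_of_le (ih cs)

-- outer while loop of A
def aLoop : List Char → List Char → List Char
  | _, [] => []
  | [], t :: ts =>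
      '[' :: (t :: (aScan [] ts).1) ++ ']' :: aLoop (aScan [] ts).2.2 (aScan [] ts).2.1
  | c :: cs, t :: ts =>
      if c = t then t :: aLoop cs ts
      else '[' :: (t :: (aScan cs ts).1) ++ ']' :: aLoop (aScan cs ts).2.2 (aScan cs ts).2.1
termination_by _ t => t.length
decreasing_by
  · exact Nat.lt_succ_of_le (aScan_len [] ts)
  · simp
  · exact Nat.lt_succ_of_le (aScan_len cs ts)

def highlight_diff_py (source : String) (target : String) : String :=
  if source == target then target ++ "  (identical)"
  else String.ofList (aLoop source.toList target.toList)

-- ===== PORT B =====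
-- render one run of characters: matching runs verbatim, differing runs in brackets
def bRender (cur : List Char) (ok : Bool) : List Char :=
  if ok then cur else '[' :: cur ++ [']']

-- loop body of B: state = (pieces, current run, current run's flag)
def bStep (st : List (List Char) × List Char × Bool) (p : Char × Bool) :
    List (List Char) × List Char × Bool :=
  if st.2.1 ≠ [] ∧ p.2 ≠ st.2.2 then (st.1 ++ [bRender st.2.1 st.2.2], [p.1], p.2)
  else (st.1, st.2.1 ++ [p.1], p.2)

def highlight_diff_py_alt (source : String) (target : String) : String :=
  if source == target then target ++ "  (identical)"
  else
    let s := source.toList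
    let t := target.toList
    let mask := (List.zipWith (fun a b => a == b) s t) ++ List.replicate (t.length - s.length) false
    let fin := (t.zip mask).foldl bStep ([], [], true)
    let pieces := if fin.2.1 ≠ [] then fin.1 ++ [bRender fin.2.1 fin.2.2] else fin.1
    String.ofList pieces.flatten

-- ===== PRECONDITION & SPEC =====
def Spec_highlight_diff_py (source : String) (target : String) (out : String) : Prop := out = highlight_diff_py_alt source target
instance (source : String) (target : String) (out : String) : Decidable (Spec_highlight_diff_py source target out) := by unfold Spec_highlight_diff_py; infer_instance

-- ===== CLAIM (what is proved, stated in full; the proofs are below) =====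
def Claim_equal_highlight_diff_py : Prop := ∀ (source : String) (target : String), Dom_highlight_diff_py source target → Spec_highlight_diff_py source target (highlight_diff_py source target)

-- ===== LEMMAS AND PROOFS =====

-- the per-position (target char, matches?) pairs both programs are really driven by
def pvPairs : List Char → List Char → List (Char × Bool)
  | _, [] => []
  | [], d :: ds => (d, false) :: pvPairs [] ds
  | c :: cs, d :: ds => (d, c == d) :: pvPairs cs ds

theorem pairs_eq (s t : List Char) :
    t.zip ((List.zipWith (fun a b => a == b) s t) ++ List.replicate (t.length - s.length) false)
      = pvPairs s t := by
  induction t generalizing s with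
  | nil => simp [pvPairs]
  | cons d ds ih =>
    cases s with
    | nil =>
      simpa [pvPairs, List.replicate_succ] using ih []
    | cons c cs =>
      simpa [pvPairs] using ih cs

-- the output as a function of the pairs: render maximal runs of equal flag
def pvH : List (Char × Bool) → List Char
  | [] => []
  | (c, b) :: l =>
      bRender (c :: (l.takeWhile (fun p => p.2 == b)).map Prod.fst) b
        ++ pvH (l.dropWhile (fun p => p.2 == b))
termination_by l => l.length
decreasing_by
  exact Nat.lt_succ_of_le (List.length_dropWhile_le _ _)

theorem pvH_true_run (L : List (Char × Bool)) :
    (L.takeWhile (fun p => p.2 == true)).map Prod.fst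
        ++ pvH (L.dropWhile (fun p => p.2 == true)) = pvH L := by
  cases L with
  | nil => simp [pvH]
  | cons p L' =>
    obtain ⟨c, b⟩ := p
    cases b with
    | false => simp [pvH]
    | true => simp [pvH, bRender]

theorem pvH_cons_true (c : Char) (L : List (Char × Bool)) :
    pvH ((c, true) :: L) = c :: pvH L := by
  rw [pvH]
  simpa [bRender] using congrArg (c :: ·) (pvH_true_run L)

-- A's inner scan computes exactly the leading differing run of the pairs
theorem aScan_take (s t : List Char) :
    (aScan s t).1 = ((pvPairs s t).takeWhile (fun p => p.2 == false)).map Prod.fst := by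
  induction t generalizing s with
  | nil => cases s <;> simp [aScan, pvPairs]
  | cons d ds ih =>
    cases s with
    | nil => simp [aScan, pvPairs, ih []]
    | cons c cs =>
      by_cases h : c = d
      · simp [aScan, pvPairs, h]
      · simp [aScan, pvPairs, h, ih cs]

theorem aScan_pairs (s t : List Char) :
    pvPairs (aScan s t).2.2 (aScan s t).2.1
      = (pvPairs s t).dropWhile (fun p => p.2 == false) := by
  induction t generalizing s with
  | nil => cases s <;> simp [aScan, pvPairs]
  | cons d ds ih =>
    cases s with
    | nil => simp [aScan, pvPairs, ih []]
    | cons c cs =>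
      by_cases h : c = d
      · simp [aScan, pvPairs, h]
      · simp [aScan, pvPairs, h, ih cs]

-- A's outer loop produces the run rendering of the pairs
theorem aLoop_eq_pvH (s t : List Char) : aLoop s t = pvH (pvPairs s t) := by
  induction s, t using aLoop.induct with
  | case1 s => simp [aLoop, pvPairs, pvH]
  | case2 d ds ih =>
    rw [aLoop, ih, aScan_take [] ds, aScan_pairs [] ds, pvPairs]
    simp [pvH, bRender]
  | case3 cs d ds ih =>
    rw [aLoop, if_pos rfl, ih, pvPairs]
    simp [pvH_cons_true]
  | case4 c cs d ds h ih =>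
    have hb : (c == d) = false := by simp [h]
    rw [aLoop, if_neg h, ih, aScan_take cs ds, aScan_pairs cs ds, pvPairs, hb]
    simp [pvH, bRender]

-- B's fold invariant: a nonempty current run renders as run-grouping of the rest
theorem bFold (l : List (Char × Bool)) (acc : List (List Char)) (cur : List Char) (ok : Bool)
    (hc : cur ≠ []) :
    (let fin := l.foldl bStep (acc, cur, ok);
     (if fin.2.1 ≠ [] then fin.1 ++ [bRender fin.2.1 fin.2.2] else fin.1).flatten)
    = acc.flatten ++ bRender (cur ++ (l.takeWhile (fun p => p.2 == ok)).map Prod.fst) ok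
        ++ pvH (l.dropWhile (fun p => p.2 == ok)) := by
  induction l generalizing acc cur ok with
  | nil => simp [hc, pvH]
  | cons p l ih =>
    obtain ⟨c, b⟩ := p
    by_cases hb : b = ok
    · subst hb
      have : bStep (acc, cur, b) (c, b) = (acc, cur ++ [c], b) := by
        simp [bStep]
      simp only [List.foldl_cons, this]
      rw [ih acc (cur ++ [c]) b (by simp)]
      simp
    · have : bStep (acc, cur, ok) (c, b) = (acc ++ [bRender cur ok], [c], b) := by
        simp [bStep, hc, hb]
      simp only [List.foldl_cons, this]
      rw [ih (acc ++ [bRender cur ok]) [c] b (by simp)]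
      simp [pvH, hb]

-- B's whole loop equals the run rendering of the pairs
theorem bMain (l : List (Char × Bool)) :
    (let fin := l.foldl bStep ([], [], true);
     (if fin.2.1 ≠ [] then fin.1 ++ [bRender fin.2.1 fin.2.2] else fin.1).flatten)
    = pvH l := by
  cases l with
  | nil => simp [pvH]
  | cons p l =>
    obtain ⟨c, b⟩ := p
    have h0 : bStep ([], [], true) (c, b) = ([], [c], b) := by simp [bStep]
    simp only [List.foldl_cons, h0]
    rw [bFold l [] [c] b (by simp)]
    simp [pvH]

-- ===== VERDICT (by name: the statement is the Claim_ definition above) =====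
theorem highlight_diff_py_spec : Claim_equal_highlight_diff_py := by
  intro source target _
  unfold Spec_highlight_diff_py highlight_diff_py highlight_diff_py_alt
  by_cases h : source == target
  · simp [h]
  · simp only [h, if_false, Bool.false_eq_true]
    rw [pairs_eq source.toList target.toList, bMain, aLoop_eq_pvH]
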